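-- pv_equiv track=rewrite | github.com/GraceAHall/galaxy2janis | src/classes/JanisFormatter.py | reduce_datatype
-- ===== SOURCE A (Python) =====
-- def reduce_datatype(type_list: list[str]) -> list[str]:
--     """
--     selects a single datatype from list of types.
--     should be either
--         - the most accessible form of the datatype (raw rather than gz)
--         - the common format (bam rather than sam)
--         - anything except 'File' fallback
--     """
--     # remove 'File' type
--     type_list = [t for t in type_list if t != 'File']
--
--     # only the 'File' type was present
--     if len(type_list) == 0:
--         return ['File']
--
--     # if had 2 types where 1 was 'File'
--     elif len(type_list) == 1:
--         return type_list
--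
--     else:
--         # remove basic types (String, Integer etc) like above 'File'?
--         pass
--
--     # TODO change this laziness. just sorting alphabetically and on length. is this even stable sort?
--     type_list.sort()
--     type_list.sort(key=lambda x: len(x))
--
--     return [type_list[0]]
-- ===== SOURCE B (Python) =====
-- def reduce_datatype(type_list: list[str]) -> list[str]:
--     filtered = [t for t in type_list if t != 'File']
--     if not filtered:
--         return ['File']
--     return [min(filtered, key=lambda x: (len(x), x))]
-- ===== Notes on version B (the rewrite author's own statement) =====
-- stated objective: simpler
-- what changed: Replaces the two stable sorts plus length-branching with a single min() scan under the composite key (len(x), x), which picks the same shortest-then-alphabetically-first datatype.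
import Mathlib
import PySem

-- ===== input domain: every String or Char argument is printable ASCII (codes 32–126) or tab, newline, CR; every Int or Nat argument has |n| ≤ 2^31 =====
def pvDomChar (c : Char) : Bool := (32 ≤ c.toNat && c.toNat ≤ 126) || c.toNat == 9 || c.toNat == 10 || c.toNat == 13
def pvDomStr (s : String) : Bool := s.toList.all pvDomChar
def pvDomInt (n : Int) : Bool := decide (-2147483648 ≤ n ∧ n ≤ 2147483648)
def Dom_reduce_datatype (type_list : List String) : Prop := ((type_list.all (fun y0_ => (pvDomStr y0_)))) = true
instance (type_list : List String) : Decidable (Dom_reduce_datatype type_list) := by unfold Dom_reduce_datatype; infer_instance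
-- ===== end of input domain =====

-- B replaces A's two stable sorts and length branching with a single min() scan under the
-- composite key (len(x), x); return value only (A only rebinds/sorts its own local list).

-- ===== PORT A =====
def reduce_datatype (type_list : List String) : List String :=
  -- type_list = [t for t in type_list if t != 'File']
  let tl := type_list.filter (fun t => t != "File")
  if tl.length == 0 then ["File"]
  else if tl.length == 1 then tl
  else
    -- type_list.sort(); type_list.sort(key=lambda x: len(x))
    let tl1 := PySem.List.sorted tl (fun x => x) false
    let tl2 := PySem.List.sorted tl1 (fun x => PySem.Str.len x) false
    -- return [type_list[0]]  (index 0 of a list that is nonempty on this branch, so exact)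
    [PySem.List.pyGetD tl2 0 ""]

-- ===== PORT B =====
def reduce_datatype_alt (type_list : List String) : List String :=
  let filtered := type_list.filter (fun t => t != "File")
  match PySem.List.min2? filtered (fun x => PySem.Str.len x) (fun x => x) with
  | none => ["File"]
  | some m => [m]

-- ===== PRECONDITION & SPEC =====
def Spec_reduce_datatype (type_list : List String) (out : List String) : Prop := out = reduce_datatype_alt type_list
instance (type_list : List String) (out : List String) : Decidable (Spec_reduce_datatype type_list out) := by unfold Spec_reduce_datatype; infer_instance

-- ===== CLAIM (what is proved, stated in full; the proofs are below) =====
def Claim_equal_reduce_datatype : Prop := ∀ (type_list : List String), Dom_reduce_datatype type_list → Spec_reduce_datatype type_list (reduce_datatype type_list)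

-- ===== LEMMAS AND PROOFS =====

-- "(len a, a) ≤ (len b, b)" in Python's lexicographic tuple order
def lexLE (a b : String) : Prop :=
  PySem.Str.len a < PySem.Str.len b ∨ (PySem.Str.len a = PySem.Str.len b ∧ a ≤ b)

theorem lexLE_trans {a b c : String} (h1 : lexLE a b) (h2 : lexLE b c) : lexLE a c := by
  rcases h1 with h1 | ⟨h1, h1'⟩ <;> rcases h2 with h2 | ⟨h2, h2'⟩
  · exact Or.inl (lt_trans h1 h2)
  · exact Or.inl (by omega)
  · exact Or.inl (by omega)
  · exact Or.inr ⟨by omega, le_trans h1' h2'⟩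

theorem lexLE_antisymm {a b : String} (h1 : lexLE a b) (h2 : lexLE b a) : a = b := by
  rcases h1 with h1 | ⟨h1, h1'⟩ <;> rcases h2 with h2 | ⟨h2, h2'⟩
  · exact absurd h2 (by omega)
  · exact absurd h1 (by omega)
  · exact absurd h2 (by omega)
  · exact le_antisymm h1' h2'

-- head of an insertion-sort fold = running minimum under `before` (first occurrence wins)
theorem head?_foldl_insertBy {α : Type} (before : α → α → Bool) :
    ∀ (l : List α) (y : α) (ys : List α),
      (l.foldl (fun acc x => PySem.List.insertBy before x acc) (y :: ys)).head? =
      some (l.foldl (fun m x => if before x m then x else m) y)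
  | [], y, ys => rfl
  | x :: l, y, ys => by
    simp only [List.foldl_cons]
    rw [PySem.List.insertBy.eq_def]
    by_cases h : before x y
    · simpa [h] using head?_foldl_insertBy before l x (y :: ys)
    · simpa [h] using head?_foldl_insertBy before l y (PySem.List.insertBy before x ys)

theorem head?_sorted_cons {α κ : Type} [LT κ] [DecidableLT κ] (key : α → κ) (a : α) (t : List α) :
    (PySem.List.sorted (a :: t) key false).head? =
    some (t.foldl (fun m x => if decide (key x < key m) then x else m) a) := by
  rw [PySem.List.sorted.eq_def]
  simpa using head?_foldl_insertBy (fun u v => decide (key u < key v)) t a []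

-- the Option fold of min2? on a cons is a plain fold
theorem foldl_optmin2 {α κ₁ κ₂ : Type} [LT κ₁] [DecidableLT κ₁] [LT κ₂] [DecidableLT κ₂]
    (k1 : α → κ₁) (k2 : α → κ₂) :
    ∀ (t : List α) (a : α),
      (t.foldl (fun acc x => match acc with
         | none => some x
         | some m => if (decide (k1 x < k1 m) || !decide (k1 m < k1 x) && decide (k2 x < k2 m)) = true
                     then some x else some m) (some a)) =
      some (t.foldl (fun m x =>
         if (decide (k1 x < k1 m) || !decide (k1 m < k1 x) && decide (k2 x < k2 m)) = true
         then x else m) a)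
  | [], a => rfl
  | x :: t, a => by
    simp only [List.foldl_cons]
    by_cases h : (decide (k1 x < k1 a) || !decide (k1 a < k1 x) && decide (k2 x < k2 a)) = true
    · simpa [h] using foldl_optmin2 k1 k2 t x
    · simpa [h] using foldl_optmin2 k1 k2 t a

theorem min2?_cons {α κ₁ κ₂ : Type} [LT κ₁] [DecidableLT κ₁] [LT κ₂] [DecidableLT κ₂]
    (k1 : α → κ₁) (k2 : α → κ₂) (a : α) (t : List α) :
    PySem.List.min2? (a :: t) k1 k2 =
      some (t.foldl (fun m x =>
         if (decide (k1 x < k1 m) || !decide (k1 m < k1 x) && decide (k2 x < k2 m)) = true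
         then x else m) a) := by
  rw [PySem.List.min2?.eq_def]
  simpa using foldl_optmin2 k1 k2 t a

-- B's fold returns a (len, lex)-minimal element of a :: t
theorem min2fold_min :
    ∀ (t : List String) (a : String),
      (t.foldl (fun m x =>
        if (decide (PySem.Str.len x < PySem.Str.len m) ||
            !decide (PySem.Str.len m < PySem.Str.len x) && decide (x < m)) = true
        then x else m) a) = a ∨
      (t.foldl (fun m x =>
        if (decide (PySem.Str.len x < PySem.Str.len m) ||
            !decide (PySem.Str.len m < PySem.Str.len x) && decide (x < m)) = true
        then x else m) a) ∈ t
  | [], a => Or.inl rfl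
  | x :: t, a => by
    simp only [List.foldl_cons]
    by_cases hc : (decide (PySem.Str.len x < PySem.Str.len a) ||
        !decide (PySem.Str.len a < PySem.Str.len x) && decide (x < a)) = true
    · rw [if_pos hc]
      rcases min2fold_min t x with h | h
      · exact Or.inr (List.mem_cons.mpr (Or.inl h))
      · exact Or.inr (List.mem_cons_of_mem _ h)
    · rw [if_neg hc]
      rcases min2fold_min t a with h | h
      · exact Or.inl h
      · exact Or.inr (List.mem_cons_of_mem _ h)

theorem min2fold_isMin :
    ∀ (t : List String) (a : String),
      lexLE (t.foldl (fun m x =>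
        if (decide (PySem.Str.len x < PySem.Str.len m) ||
            !decide (PySem.Str.len m < PySem.Str.len x) && decide (x < m)) = true
        then x else m) a) a ∧
      ∀ y ∈ t, lexLE (t.foldl (fun m x =>
        if (decide (PySem.Str.len x < PySem.Str.len m) ||
            !decide (PySem.Str.len m < PySem.Str.len x) && decide (x < m)) = true
        then x else m) a) y
  | [], a => ⟨Or.inr ⟨rfl, le_refl a⟩, by simp⟩
  | x :: t, a => by
    simp only [List.foldl_cons]
    by_cases h : (decide (PySem.Str.len x < PySem.Str.len a) ||
        !decide (PySem.Str.len a < PySem.Str.len x) && decide (x < a)) = true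
    · rw [if_pos h]
      obtain ⟨h1, h2⟩ := min2fold_isMin t x
      have hxa : lexLE x a := by
        simp only [Bool.or_eq_true, Bool.and_eq_true, Bool.not_eq_true', decide_eq_true_eq,
          decide_eq_false_iff_not] at h
        rcases h with h | ⟨h, h'⟩
        · exact Or.inl h
        · by_cases hl : PySem.Str.len x < PySem.Str.len a
          · exact Or.inl hl
          · exact Or.inr ⟨by omega, le_of_lt h'⟩
      refine ⟨lexLE_trans h1 hxa, ?_⟩
      intro y hy
      rcases List.mem_cons.mp hy with rfl | hy
      · exact h1
      · exact h2 y hy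
    · rw [if_neg h]
      obtain ⟨h1, h2⟩ := min2fold_isMin t a
      have hax : lexLE a x := by
        simp only [Bool.or_eq_true, Bool.and_eq_true, Bool.not_eq_true', decide_eq_true_eq,
          decide_eq_false_iff_not, not_or, not_and, not_lt] at h
        obtain ⟨h3, h4⟩ := h
        by_cases hl : PySem.Str.len a < PySem.Str.len x
        · exact Or.inl hl
        · exact Or.inr ⟨by omega, h4 (by omega)⟩
      refine ⟨h1, ?_⟩
      intro y hy
      rcases List.mem_cons.mp hy with rfl | hy
      · exact lexLE_trans h1 hax
      · exact h2 y hy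

-- A's length-keyed running minimum on a lexicographically ordered list is (len, lex)-minimal
theorem lenfold_isMin :
    ∀ (t : List String) (a : String), t.Pairwise (· ≤ ·) → (∀ y ∈ t, a ≤ y) →
      ((t.foldl (fun m x => if decide (PySem.Str.len x < PySem.Str.len m) then x else m) a) = a ∨
       (t.foldl (fun m x => if decide (PySem.Str.len x < PySem.Str.len m) then x else m) a) ∈ t) ∧
      lexLE (t.foldl (fun m x => if decide (PySem.Str.len x < PySem.Str.len m) then x else m) a) a ∧
      ∀ y ∈ t, lexLE (t.foldl (fun m x => if decide (PySem.Str.len x < PySem.Str.len m) then x else m) a) y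
  | [], a, _, _ => ⟨Or.inl rfl, Or.inr ⟨rfl, le_refl a⟩, by simp⟩
  | x :: t, a, hp, hle => by
    simp only [List.foldl_cons]
    have hpt : t.Pairwise (· ≤ ·) := (List.pairwise_cons.mp hp).2
    have hxt : ∀ y ∈ t, x ≤ y := (List.pairwise_cons.mp hp).1
    by_cases h : decide (PySem.Str.len x < PySem.Str.len a) = true
    · rw [if_pos h]
      simp only [decide_eq_true_eq] at h
      obtain ⟨hm, h1, h2⟩ := lenfold_isMin t x hpt hxt
      refine ⟨?_, lexLE_trans h1 (Or.inl h), ?_⟩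
      · rcases hm with hm | hm
        · exact Or.inr (List.mem_cons.mpr (Or.inl hm))
        · exact Or.inr (List.mem_cons_of_mem _ hm)
      · intro y hy
        rcases List.mem_cons.mp hy with rfl | hy
        · exact h1
        · exact h2 y hy
    · rw [if_neg h]
      simp only [decide_eq_true_eq, not_lt] at h
      obtain ⟨hm, h1, h2⟩ := lenfold_isMin t a hpt (fun y hy => hle y (List.mem_cons_of_mem _ hy))
      have hax : lexLE a x := by
        by_cases hl : PySem.Str.len a < PySem.Str.len x
        · exact Or.inl hl
        · exact Or.inr ⟨by omega, hle x List.mem_cons_self⟩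
      refine ⟨?_, h1, ?_⟩
      · rcases hm with hm | hm
        · exact Or.inl hm
        · exact Or.inr (List.mem_cons_of_mem _ hm)
      · intro y hy
        rcases List.mem_cons.mp hy with rfl | hy
        · exact lexLE_trans h1 hax
        · exact h2 y hy

-- ===== VERDICT (by name: the statement is the Claim_ definition above) =====
theorem reduce_datatype_spec : Claim_equal_reduce_datatype := by
  intro type_list _
  unfold Spec_reduce_datatype reduce_datatype reduce_datatype_alt
  simp only []
  cases hF : type_list.filter (fun t => t != "File") with
  | nil => simp [PySem.List.min2?]
  | cons a t =>
    rw [min2?_cons]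
    cases t with
    | nil => simp
    | cons x t' =>
      simp only [List.length_cons, List.foldl_cons]
      have h0 : ¬ ((t'.length + 1 + 1 == 0) = true) := by simp
      have h1 : ¬ ((t'.length + 1 + 1 == 1) = true) := by simp
      rw [if_neg h0, if_neg h1]
      -- name the first (lexicographic) sort and split it as a cons
      set l := a :: x :: t' with hl
      have hlne : PySem.List.sorted l (fun s => s) false ≠ [] := by
        intro hnil
        rw [PySem.List.sorted_eq_nil_iff] at hnil
        simp [hl] at hnil
      obtain ⟨b, r, hbr⟩ := List.exists_cons_of_ne_nil hlne
      rw [hbr]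
      -- A's outer sort: its head is the running length-minimum over b :: r
      have hhead := head?_sorted_cons (fun s => PySem.Str.len s) b r
      cases h2 : PySem.List.sorted (b :: r) (fun s => PySem.Str.len s) false with
      | nil =>
        rw [PySem.List.sorted_eq_nil_iff] at h2
        exact absurd h2 (by simp)
      | cons c s =>
        rw [h2] at hhead
        simp only [List.head?_cons, Option.some.injEq] at hhead
        -- A returns [c]
        have hget : PySem.List.pyGetD (c :: s) 0 "" = c := by
          simp [PySem.List.pyGetD, PySem.List.pyIdx?, PySem.List.pyGet?]
        rw [hget]
        -- properties of A's element c
        have hpw : (b :: r).Pairwise (fun u v : String => u ≤ v) := by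
          have := PySem.List.sorted_pairwise l (fun s : String => s)
          rw [hbr] at this; exact this
        obtain ⟨hcmem, hc1, hc2⟩ :=
          lenfold_isMin r b (List.pairwise_cons.mp hpw).2 (List.pairwise_cons.mp hpw).1
        rw [← hhead] at hcmem hc1 hc2
        have hcl : c ∈ l := by
          have : c ∈ b :: r := by
            rcases hcmem with hc | hc
            · exact List.mem_cons.mpr (Or.inl hc)
            · exact List.mem_cons_of_mem _ hc
          rw [← hbr] at this
          exact (PySem.List.mem_sorted l _ false c).mp this
        have hcmin : ∀ y ∈ l, lexLE c y := by
          intro y hy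
          have hy' : y ∈ b :: r := by
            rw [← hbr]; exact (PySem.List.mem_sorted l _ false y).mpr hy
          rcases List.mem_cons.mp hy' with rfl | hy''
          · exact hc1
          · exact hc2 y hy''
        -- properties of B's element
        obtain hm := min2fold_min (x :: t') a
        obtain ⟨hm1, hm2⟩ := min2fold_isMin (x :: t') a
        set mB := (x :: t').foldl (fun m x =>
          if (decide (PySem.Str.len x < PySem.Str.len m) ||
              !decide (PySem.Str.len m < PySem.Str.len x) && decide (x < m)) = true
          then x else m) a with hmB
        have hmBl : mB ∈ l := by
          rcases hm with h | h
          · exact h ▸ List.mem_cons_self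
          · exact List.mem_cons_of_mem _ h
        have hmBmin : ∀ y ∈ l, lexLE mB y := by
          intro y hy
          rcases List.mem_cons.mp hy with rfl | hy
          · exact hm1
          · exact hm2 y hy
        have : c = mB := lexLE_antisymm (hcmin mB hmBl) (hmBmin c hcl)
        rw [this, hmB, List.foldl_cons]
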